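-- pv_equiv track=rewrite | github.com/Saathvik879/INTERN | ultimate_backend.py | generate_career_recommendations
-- ===== SOURCE A (Python) =====
-- from typing import List, Dict, Any, Optional
--
-- def generate_career_recommendations(skills: List[str]) -> List[str]:
--     """Generate career recommendations"""
--     recommendations = []
--
--     if any(skill in skills for skill in ['React', 'JavaScript', 'HTML', 'CSS']):
--         recommendations.append("Frontend/Full-stack Developer roles align with your web skills")
--     if any(skill in skills for skill in ['Python', 'Django', 'Flask']):
--         recommendations.append("Backend Python Developer positions match your expertise")
--     if any(skill in skills for skill in ['Java', 'Spring Boot']):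
--         recommendations.append("Java Developer roles would be a great fit")
--     if any(skill in skills for skill in ['Machine Learning', 'Data Analysis', 'Python']):
--         recommendations.append("Data Science and AI/ML opportunities align with your skills")
--     if any(skill in skills for skill in ['Mobile Development', 'Android', 'iOS']):
--         recommendations.append("Mobile App Development roles match your background")
--
--     if not recommendations:
--         recommendations.append("Continue building diverse projects to showcase your programming abilities")
--
--     return recommendations
-- ===== SOURCE B (Python) =====
-- MESSAGES = [
--     "Frontend/Full-stack Developer roles align with your web skills",
--     "Backend Python Developer positions match your expertise",
--     "Java Developer roles would be a great fit",
--     "Data Science and AI/ML opportunities align with your skills",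
--     "Mobile App Development roles match your background",
-- ]
--
-- # Inverted index: skill -> rule indices it triggers.
-- SKILL_TO_RULES = {
--     'React': (0,), 'JavaScript': (0,), 'HTML': (0,), 'CSS': (0,),
--     'Python': (1, 3), 'Django': (1,), 'Flask': (1,),
--     'Java': (2,), 'Spring Boot': (2,),
--     'Machine Learning': (3,), 'Data Analysis': (3,),
--     'Mobile Development': (4,), 'Android': (4,), 'iOS': (4,),
-- }
--
-- def generate_career_recommendations(skills):
--     """Generate career recommendations"""
--     hit = [False] * 5
--     for s in skills:
--         for i in SKILL_TO_RULES.get(s, ()):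
--             hit[i] = True
--     recs = [MESSAGES[i] for i in range(5) if hit[i]]
--     return recs or ["Continue building diverse projects to showcase your programming abilities"]
-- ===== Notes on version B (the rewrite author's own statement) =====
-- stated objective: faster
-- what changed: Inverts the traversal: instead of five per-rule 'any trigger in skills' scans of the input list, B makes one pass over the skills, consults an inverted skill-to-rule-indices dict to set boolean flags, then emits the flagged rules' messages in rule order (same fallback); the up-to-14 O(n) list scans become n O(1) dict lookups.
import Mathlib
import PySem

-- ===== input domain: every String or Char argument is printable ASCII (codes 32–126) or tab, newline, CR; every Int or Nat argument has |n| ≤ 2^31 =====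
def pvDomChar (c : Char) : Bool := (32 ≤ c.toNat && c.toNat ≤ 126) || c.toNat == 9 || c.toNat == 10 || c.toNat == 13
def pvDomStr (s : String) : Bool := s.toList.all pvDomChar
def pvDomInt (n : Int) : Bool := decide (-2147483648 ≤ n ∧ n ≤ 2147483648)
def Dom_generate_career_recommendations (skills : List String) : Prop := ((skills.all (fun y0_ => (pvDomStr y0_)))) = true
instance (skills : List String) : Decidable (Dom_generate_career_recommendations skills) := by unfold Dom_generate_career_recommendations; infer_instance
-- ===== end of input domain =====

-- B inverts A's traversal: one pass over the input skills with an inverted skill->rule-index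
-- dictionary setting boolean flags, then the flagged rules' messages are emitted in rule order
-- (objective: faster by a constant factor, measured: n O(1) dict lookups replace up to 14 O(n) list scans).


-- ===== PORT A =====
def generate_career_recommendations (skills : List String) : List String :=
  let recommendations : List String := []
  let recommendations :=
    if (["React", "JavaScript", "HTML", "CSS"].any (fun skill => skills.contains skill)) then
      recommendations ++ ["Frontend/Full-stack Developer roles align with your web skills"]
    else recommendations
  let recommendations :=
    if (["Python", "Django", "Flask"].any (fun skill => skills.contains skill)) then
      recommendations ++ ["Backend Python Developer positions match your expertise"]
    else recommendations
  let recommendations :=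
    if (["Java", "Spring Boot"].any (fun skill => skills.contains skill)) then
      recommendations ++ ["Java Developer roles would be a great fit"]
    else recommendations
  let recommendations :=
    if (["Machine Learning", "Data Analysis", "Python"].any (fun skill => skills.contains skill)) then
      recommendations ++ ["Data Science and AI/ML opportunities align with your skills"]
    else recommendations
  let recommendations :=
    if (["Mobile Development", "Android", "iOS"].any (fun skill => skills.contains skill)) then
      recommendations ++ ["Mobile App Development roles match your background"]
    else recommendations
  let recommendations :=
    if recommendations = [] then
      recommendations ++ ["Continue building diverse projects to showcase your programming abilities"]
    else recommendations
  recommendations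

-- ===== PORT B =====
def pvMessages : List String :=
  [ "Frontend/Full-stack Developer roles align with your web skills",
    "Backend Python Developer positions match your expertise",
    "Java Developer roles would be a great fit",
    "Data Science and AI/ML opportunities align with your skills",
    "Mobile App Development roles match your background" ]

-- SKILL_TO_RULES dict literal (distinct keys); lookup via PySem.Dict.getD with default []
def pvIndex : PySem.Dict String (List Int) :=
  PySem.Dict.ofList
    [ ("React", [0]), ("JavaScript", [0]), ("HTML", [0]), ("CSS", [0]),
      ("Python", [1, 3]), ("Django", [1]), ("Flask", [1]),
      ("Java", [2]), ("Spring Boot", [2]),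
      ("Machine Learning", [3]), ("Data Analysis", [3]),
      ("Mobile Development", [4]), ("Android", [4]), ("iOS", [4]) ]

-- hit[i] = True for the literal nonnegative indices 0..4, so .set i.toNat is exact here
def pvSetHit (hit : List Bool) (i : Int) : List Bool :=
  hit.set i.toNat true

def pvStep (hit : List Bool) (s : String) : List Bool :=
  (PySem.Dict.getD pvIndex s []).foldl pvSetHit hit

def generate_career_recommendations_alt (skills : List String) : List String :=
  let hit : List Bool := List.replicate 5 false
  let hit := skills.foldl pvStep hit
  -- [MESSAGES[i] for i in range(5) if hit[i]]
  let recs : List String :=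
    ((PySem.List.pyRange 0 5 1).filter (fun i => hit.getD i.toNat false)).map
      (fun i => pvMessages.getD i.toNat "")
  if recs = [] then
    ["Continue building diverse projects to showcase your programming abilities"]
  else recs

-- ===== PRECONDITION & SPEC =====
def Spec_generate_career_recommendations (skills : List String) (out : List String) : Prop := out = generate_career_recommendations_alt skills
instance (skills : List String) (out : List String) : Decidable (Spec_generate_career_recommendations skills out) := by unfold Spec_generate_career_recommendations; infer_instance

-- ===== CLAIM =====
def Claim_equal_generate_career_recommendations : Prop := ∀ (skills : List String), Dom_generate_career_recommendations skills → Spec_generate_career_recommendations skills (generate_career_recommendations skills)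

-- ===== LEMMAS AND PROOFS =====

-- per-skill dict lookup characterised as an if-chain over the keys
set_option maxHeartbeats 2000000 in
theorem pv_rules_eq (s : String) :
    PySem.Dict.getD pvIndex s [] =
      (if s = "iOS" then ([4] : List Int) else if s = "Android" then [4]
       else if s = "Mobile Development" then [4] else if s = "Data Analysis" then [3]
       else if s = "Machine Learning" then [3] else if s = "Spring Boot" then [2]
       else if s = "Java" then [2] else if s = "Flask" then [1]
       else if s = "Django" then [1] else if s = "Python" then [1, 3]
       else if s = "CSS" then [0] else if s = "HTML" then [0]
       else if s = "JavaScript" then [0] else if s = "React" then [0] else []) := by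
  simp [pvIndex, PySem.Dict.ofList, PySem.Dict.update, List.foldl, PySem.Dict.getD_insert]

def pvG0 (s : String) : Bool := s == "React" || s == "JavaScript" || s == "HTML" || s == "CSS"
def pvG1 (s : String) : Bool := s == "Python" || s == "Django" || s == "Flask"
def pvG2 (s : String) : Bool := s == "Java" || s == "Spring Boot"
def pvG3 (s : String) : Bool := s == "Machine Learning" || s == "Data Analysis" || s == "Python"
def pvG4 (s : String) : Bool := s == "Mobile Development" || s == "Android" || s == "iOS"

-- effect of processing one skill on the five flags
set_option maxHeartbeats 2000000 in
theorem pv_step_cons (a b c d e : Bool) (s : String) :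
    pvStep [a, b, c, d, e] s =
      [a || pvG0 s, b || pvG1 s, c || pvG2 s, d || pvG3 s, e || pvG4 s] := by
  simp only [pvStep, pv_rules_eq, pvG0, pvG1, pvG2, pvG3, pvG4]
  by_cases h1 : s = "iOS"
  · subst h1; simp [pvSetHit]
  · rw [if_neg h1]
    by_cases h2 : s = "Android"
    · subst h2; simp [pvSetHit]
    · rw [if_neg h2]
      by_cases h3 : s = "Mobile Development"
      · subst h3; simp [pvSetHit]
      · rw [if_neg h3]
        by_cases h4 : s = "Data Analysis"
        · subst h4; simp [pvSetHit]
        · rw [if_neg h4]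
          by_cases h5 : s = "Machine Learning"
          · subst h5; simp [pvSetHit]
          · rw [if_neg h5]
            by_cases h6 : s = "Spring Boot"
            · subst h6; simp [pvSetHit]
            · rw [if_neg h6]
              by_cases h7 : s = "Java"
              · subst h7; simp [pvSetHit]
              · rw [if_neg h7]
                by_cases h8 : s = "Flask"
                · subst h8; simp [pvSetHit]
                · rw [if_neg h8]
                  by_cases h9 : s = "Django"
                  · subst h9; simp [pvSetHit]
                  · rw [if_neg h9]
                    by_cases h10 : s = "Python"
                    · subst h10; simp [pvSetHit]
                    · rw [if_neg h10]
                      by_cases h11 : s = "CSS"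
                      · subst h11; simp [pvSetHit]
                      · rw [if_neg h11]
                        by_cases h12 : s = "HTML"
                        · subst h12; simp [pvSetHit]
                        · rw [if_neg h12]
                          by_cases h13 : s = "JavaScript"
                          · subst h13; simp [pvSetHit]
                          · rw [if_neg h13]
                            by_cases h14 : s = "React"
                            · subst h14; simp [pvSetHit]
                            · rw [if_neg h14]
                              simp [beq_iff_eq, h1, h2, h3, h4, h5, h6, h7, h8, h9, h10, h11, h12, h13, h14]

-- the whole pass over the skills, flag by flag
theorem pv_fold (skills : List String) (a b c d e : Bool) :
    skills.foldl pvStep [a, b, c, d, e] =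
      [a || skills.any pvG0, b || skills.any pvG1, c || skills.any pvG2,
       d || skills.any pvG3, e || skills.any pvG4] := by
  induction skills generalizing a b c d e with
  | nil => simp
  | cons x xs ih =>
    simp only [List.foldl_cons, List.any_cons, pv_step_cons, ih, Bool.or_assoc]

-- each flag condition equals A's corresponding trigger test
theorem pv_any_g0 (skills : List String) :
    skills.any pvG0 = ["React", "JavaScript", "HTML", "CSS"].any (fun t => skills.contains t) := by
  apply Bool.eq_iff_iff.mpr
  simp only [List.any_eq_true, Bool.or_eq_true, pvG0, beq_iff_eq, List.contains_iff_mem,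
    List.mem_cons, List.not_mem_nil, or_false]
  constructor <;> rintro ⟨x, h1, h2⟩ <;> refine ⟨x, ?_, ?_⟩ <;> tauto
theorem pv_any_g1 (skills : List String) :
    skills.any pvG1 = ["Python", "Django", "Flask"].any (fun t => skills.contains t) := by
  apply Bool.eq_iff_iff.mpr
  simp only [List.any_eq_true, Bool.or_eq_true, pvG1, beq_iff_eq, List.contains_iff_mem,
    List.mem_cons, List.not_mem_nil, or_false]
  constructor <;> rintro ⟨x, h1, h2⟩ <;> refine ⟨x, ?_, ?_⟩ <;> tauto
theorem pv_any_g2 (skills : List String) :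
    skills.any pvG2 = ["Java", "Spring Boot"].any (fun t => skills.contains t) := by
  apply Bool.eq_iff_iff.mpr
  simp only [List.any_eq_true, Bool.or_eq_true, pvG2, beq_iff_eq, List.contains_iff_mem,
    List.mem_cons, List.not_mem_nil, or_false]
  constructor <;> rintro ⟨x, h1, h2⟩ <;> refine ⟨x, ?_, ?_⟩ <;> tauto
theorem pv_any_g3 (skills : List String) :
    skills.any pvG3 = ["Machine Learning", "Data Analysis", "Python"].any (fun t => skills.contains t) := by
  apply Bool.eq_iff_iff.mpr
  simp only [List.any_eq_true, Bool.or_eq_true, pvG3, beq_iff_eq, List.contains_iff_mem,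
    List.mem_cons, List.not_mem_nil, or_false]
  constructor <;> rintro ⟨x, h1, h2⟩ <;> refine ⟨x, ?_, ?_⟩ <;> tauto
theorem pv_any_g4 (skills : List String) :
    skills.any pvG4 = ["Mobile Development", "Android", "iOS"].any (fun t => skills.contains t) := by
  apply Bool.eq_iff_iff.mpr
  simp only [List.any_eq_true, Bool.or_eq_true, pvG4, beq_iff_eq, List.contains_iff_mem,
    List.mem_cons, List.not_mem_nil, or_false]
  constructor <;> rintro ⟨x, h1, h2⟩ <;> refine ⟨x, ?_, ?_⟩ <;> tauto

-- ===== VERDICT =====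
set_option maxHeartbeats 2000000 in
theorem generate_career_recommendations_spec : Claim_equal_generate_career_recommendations := by
  intro skills _
  unfold Spec_generate_career_recommendations generate_career_recommendations
    generate_career_recommendations_alt
  have hrep : (List.replicate 5 false : List Bool) = [false, false, false, false, false] := rfl
  have hr : PySem.List.pyRange 0 5 1 = [0, 1, 2, 3, 4] := by decide
  simp only [hrep, pv_fold, pv_any_g0, pv_any_g1, pv_any_g2, pv_any_g3, pv_any_g4, hr]
  cases h1 : ["React", "JavaScript", "HTML", "CSS"].any (fun t => skills.contains t) <;>
  cases h2 : ["Python", "Django", "Flask"].any (fun t => skills.contains t) <;>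
  cases h3 : ["Java", "Spring Boot"].any (fun t => skills.contains t) <;>
  cases h4 : ["Machine Learning", "Data Analysis", "Python"].any (fun t => skills.contains t) <;>
  cases h5 : ["Mobile Development", "Android", "iOS"].any (fun t => skills.contains t) <;>
  simp [h1, h2, h3, h4, h5, pvMessages, List.filter, List.getD]
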